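-- pv_equiv track=rewrite | github.com/SnowSpider/Dashboard | MonthlyReport.py | dupe
-- ===== SOURCE A (Python) =====
-- def dupe(arr, elem): # check if elem has multiple clones in arr
--   counter = 0
--   for e in arr:
--     if e == elem:
--       counter += 1
--   if counter >= 2:
--     return 1
--   else:
--     return 0
-- ===== SOURCE B (Python) =====
-- def dupe(arr, elem): # check if elem has multiple clones in arr
--     if elem not in arr:
--         return 0
--     i = arr.index(elem)
--     return 1 if elem in arr[i + 1:] else 0
-- ===== Notes on version B (the rewrite author's own statement) =====
-- stated objective: alternative
-- what changed: Replaces the count-all-occurrences full pass with a two-stage search: find the first occurrence, then test membership in the remaining tail, stopping at the second hit.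
import Mathlib
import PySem

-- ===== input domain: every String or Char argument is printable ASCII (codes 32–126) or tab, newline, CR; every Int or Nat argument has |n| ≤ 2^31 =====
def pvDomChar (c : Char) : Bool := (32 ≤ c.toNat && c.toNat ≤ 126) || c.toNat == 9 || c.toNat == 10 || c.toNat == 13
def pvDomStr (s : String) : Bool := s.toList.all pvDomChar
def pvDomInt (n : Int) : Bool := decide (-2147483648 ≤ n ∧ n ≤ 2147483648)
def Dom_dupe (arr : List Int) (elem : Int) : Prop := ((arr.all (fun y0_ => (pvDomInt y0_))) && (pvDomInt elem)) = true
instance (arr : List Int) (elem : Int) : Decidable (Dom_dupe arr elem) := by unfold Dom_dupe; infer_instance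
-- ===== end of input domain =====

-- B replaces A's count-all-occurrences pass by find-first-occurrence-then-search-the-tail (alternative decomposition, same cost).

-- ===== PORT A =====
def dupe (arr : List Int) (elem : Int) : Int :=
  let counter := arr.foldl (fun c e => if e == elem then c + 1 else c) (0 : Int)
  if counter ≥ 2 then 1 else 0

-- ===== PORT B =====
def dupe_alt (arr : List Int) (elem : Int) : Int :=
  if ¬ arr.contains elem then 0
  else
    match PySem.List.index? arr elem with
    | none => 0                                   -- unreachable: elem ∈ arr
    | some i => if (PySem.List.slice arr (some ((i : Int) + 1)) none).contains elem then 1 else 0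

-- ===== PRECONDITION & SPEC =====
def Spec_dupe (arr : List Int) (elem : Int) (out : Int) : Prop := out = dupe_alt arr elem
instance (arr : List Int) (elem : Int) (out : Int) : Decidable (Spec_dupe arr elem out) := by unfold Spec_dupe; infer_instance

-- ===== CLAIM (what is proved, stated in full; the proofs are below) =====
def Claim_equal_dupe : Prop := ∀ (arr : List Int) (elem : Int), Dom_dupe arr elem → Spec_dupe arr elem (dupe arr elem)

-- ===== LEMMAS AND PROOFS =====

lemma dupe_foldl_count (arr : List Int) (elem : Int) (c : Int) :
    arr.foldl (fun c e => if e == elem then c + 1 else c) c = c + (arr.count elem : Int) := by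
  induction arr generalizing c with
  | nil => simp
  | cons h t ih =>
    rw [List.foldl_cons, List.count_cons]
    by_cases he : h = elem
    · rw [if_pos (by simpa using he), ih, if_pos (by simpa using he)]
      push_cast; ring
    · rw [if_neg (by simpa using he), ih, if_neg (by simpa using he)]
      push_cast; ring

lemma dupe_eq_count (arr : List Int) (elem : Int) :
    dupe arr elem = if 2 ≤ arr.count elem then 1 else 0 := by
  simp only [dupe, dupe_foldl_count, zero_add, ge_iff_le]
  by_cases h : 2 ≤ arr.count elem <;> simp [h]

lemma dupe_alt_eq_count (arr : List Int) (elem : Int) :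
    dupe_alt arr elem = if 2 ≤ arr.count elem then 1 else 0 := by
  by_cases hmem : elem ∈ arr
  · obtain ⟨i, hi⟩ := Option.isSome_iff_exists.mp ((PySem.List.index?_isSome_iff arr elem).mpr hmem)
    obtain ⟨pre, suf, hx, hlen, hpre⟩ := (PySem.List.index?_eq_some_iff arr elem i).mp hi
    have hslice : PySem.List.slice arr (some ((i : Int) + 1)) none = suf := by
      rw [show ((i : Int) + 1) = ((i + 1 : Nat) : Int) by push_cast; ring,
          PySem.List.slice_from_natCast, hx, ← hlen]
      rw [show pre ++ elem :: suf = (pre ++ [elem]) ++ suf by simp]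
      exact List.drop_left' (by simp)
    have hcnt : arr.count elem = suf.count elem + 1 := by
      rw [hx]
      simp [List.count_append, List.count_eq_zero.mpr hpre]
    unfold dupe_alt
    rw [if_neg (by simp [hmem])]
    simp only [hi, hslice, hcnt]
    by_cases hs : elem ∈ suf
    · have h1 : 1 ≤ suf.count elem := List.count_pos_iff.mpr hs
      rw [if_pos (by simpa [List.contains_iff_mem]), if_pos (by omega)]
    · have h0 : suf.count elem = 0 := List.count_eq_zero.mpr hs
      rw [if_neg (by simpa [List.contains_iff_mem]), if_neg (by omega)]
  · have h0 : arr.count elem = 0 := List.count_eq_zero.mpr hmem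
    simp [dupe_alt, hmem, h0]

-- ===== VERDICT (by name: the statement is the Claim_ definition above) =====
theorem dupe_spec : Claim_equal_dupe := by
  intro arr elem _
  unfold Spec_dupe
  rw [dupe_eq_count, dupe_alt_eq_count]
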